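-- pv_equiv track=rewrite | github.com/rdyzakya/IndoLEGO-ABSA | doe/order_id/aos/nb.py | seperate_target_prediction_per_task
-- ===== SOURCE A (Python) =====
-- from typing import List, Dict, Tuple
--
-- def seperate_target_prediction_per_task(predictions:List[List[Dict]],targets:List[List[Dict]],tasks:List) -> Tuple[Dict[str,List],Dict[str,List]]:
--     per_task_targets = {}
--     per_task_predictions = {}
--     for target, prediction, task in zip(targets,predictions,tasks):
--         if task not in per_task_targets.keys():
--             per_task_targets[task] = []
--         if task not in per_task_predictions.keys():
--             per_task_predictions[task] = []
--         per_task_targets[task].append(target)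
--         per_task_predictions[task].append(prediction)
--     return per_task_targets, per_task_predictions
-- ===== SOURCE B (Python) =====
-- def seperate_target_prediction_per_task(predictions, targets, tasks):
--     rows = list(zip(targets, predictions, tasks))
--     uniq = list(dict.fromkeys(task for _, _, task in rows))
--     per_task_targets = {k: [t for t, _, tk in rows if tk == k] for k in uniq}
--     per_task_predictions = {k: [p for _, p, tk in rows if tk == k] for k in uniq}
--     return per_task_targets, per_task_predictions
-- ===== Notes on version B (the rewrite author's own statement) =====
-- stated objective: alternative
-- what changed: Replaces the single interleaved dict-building pass (membership test + per-key append inside one loop) by first computing the distinct tasks in first-appearance order with dict.fromkeys and then building each dict with one filtered scan of the rows per task.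
import Mathlib
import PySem

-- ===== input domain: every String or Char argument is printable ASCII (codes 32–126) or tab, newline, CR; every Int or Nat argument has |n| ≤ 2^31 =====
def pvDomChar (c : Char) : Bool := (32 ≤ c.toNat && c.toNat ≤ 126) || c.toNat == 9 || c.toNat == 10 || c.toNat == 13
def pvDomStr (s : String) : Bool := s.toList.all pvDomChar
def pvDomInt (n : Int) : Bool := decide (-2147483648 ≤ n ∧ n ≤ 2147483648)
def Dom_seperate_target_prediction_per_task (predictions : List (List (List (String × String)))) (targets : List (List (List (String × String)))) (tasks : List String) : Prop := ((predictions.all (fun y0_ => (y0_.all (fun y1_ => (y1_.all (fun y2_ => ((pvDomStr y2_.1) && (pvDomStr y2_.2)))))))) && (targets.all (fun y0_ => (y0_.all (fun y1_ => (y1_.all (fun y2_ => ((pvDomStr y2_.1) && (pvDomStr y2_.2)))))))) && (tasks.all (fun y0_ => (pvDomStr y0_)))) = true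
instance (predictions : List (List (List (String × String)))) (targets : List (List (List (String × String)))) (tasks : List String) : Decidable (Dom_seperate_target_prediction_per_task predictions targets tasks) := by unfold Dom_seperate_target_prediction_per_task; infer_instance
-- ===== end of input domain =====

-- B changes the decomposition: distinct tasks first, then one filtered scan per task (objective: alternative).

-- ===== PORT A =====
-- one interleaved pass: for (target, prediction, task) in zip: ensure key, then append to both dicts
def seperate_target_prediction_per_task (predictions : List (List (List (String × String)))) (targets : List (List (List (String × String)))) (tasks : List String) : (List (String × List (List (List (String × String))))) × (List (String × List (List (List (String × String))))) :=
  let final := (targets.zip (predictions.zip tasks)).foldl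
    (fun (st : PySem.Dict String (List (List (List (String × String)))) × PySem.Dict String (List (List (List (String × String))))) row =>
      let target := row.1
      let prediction := row.2.1
      let task := row.2.2
      let dt := if st.1.contains task then st.1 else st.1.insert task []   -- if task not in per_task_targets.keys(): ... = []
      let dp := if st.2.contains task then st.2 else st.2.insert task []   -- if task not in per_task_predictions.keys(): ... = []
      (dt.modify task [] (· ++ [target]),                                  -- per_task_targets[task].append(target)
       dp.modify task [] (· ++ [prediction])))                             -- per_task_predictions[task].append(prediction)
    (PySem.Dict.empty, PySem.Dict.empty)
  (final.1.items, final.2.items)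

-- ===== PORT B =====
def seperate_target_prediction_per_task_alt (predictions : List (List (List (String × String)))) (targets : List (List (List (String × String)))) (tasks : List String) : (List (String × List (List (List (String × String))))) × (List (String × List (List (List (String × String))))) :=
  let rows := targets.zip (predictions.zip tasks)
  let uniq := PySem.List.dedup (rows.map (fun r => r.2.2))                 -- list(dict.fromkeys(...))
  (uniq.map (fun k => (k, (rows.filter (fun r => r.2.2 == k)).map (fun r => r.1))),
   uniq.map (fun k => (k, (rows.filter (fun r => r.2.2 == k)).map (fun r => r.2.1))))

-- ===== PRECONDITION & SPEC =====
def Spec_seperate_target_prediction_per_task (predictions : List (List (List (String × String)))) (targets : List (List (List (String × String)))) (tasks : List String) (out : (List (String × List (List (List (String × String))))) × (List (String × List (List (List (String × String)))))) : Prop := out = seperate_target_prediction_per_task_alt predictions targets tasks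
instance (predictions : List (List (List (String × String)))) (targets : List (List (List (String × String)))) (tasks : List String) (out : (List (String × List (List (List (String × String))))) × (List (String × List (List (List (String × String)))))) : Decidable (Spec_seperate_target_prediction_per_task predictions targets tasks out) := by
  unfold Spec_seperate_target_prediction_per_task
  letI d1 : DecidableEq (List (List (String × String))) := inferInstance
  letI d2 : DecidableEq (List (List (List (String × String)))) := @instDecidableEqList _ d1
  letI d3 : DecidableEq (String × List (List (List (String × String)))) := @instDecidableEqProd _ _ inferInstance d2
  letI d4 : DecidableEq (List (String × List (List (List (String × String))))) := @instDecidableEqList _ d3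
  exact @instDecidableEqProd _ _ d4 d4 out _

-- ===== CLAIM (what is proved, stated in full; the proofs are below) =====
def Claim_equal_seperate_target_prediction_per_task : Prop := ∀ (predictions : List (List (List (String × String)))) (targets : List (List (List (String × String)))) (tasks : List String), Dom_seperate_target_prediction_per_task predictions targets tasks → Spec_seperate_target_prediction_per_task predictions targets tasks (seperate_target_prediction_per_task predictions targets tasks)

-- ===== LEMMAS AND PROOFS =====

-- A's "ensure key then append" step collapses to a single modify-append
theorem ensure_modify {ν : Type} (d : PySem.Dict String (List ν)) (k : String) (x : ν) :
    (if d.contains k then d else d.insert k []).modify k [] (· ++ [x]) = d.modify k [] (· ++ [x]) := by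
  by_cases h : d.contains k = true
  · simp [h]
  · have h' : d.contains k = false := by simpa using h
    simp only [h', Bool.false_eq_true, ite_false]
    simp [PySem.Dict.modify, PySem.Dict.getD_insert_self, PySem.Dict.insert_insert_self,
      PySem.Dict.getD_of_not_contains d _ h']

-- a fold with an independent pair state splits into two folds
theorem foldl_pair_split {α σ τ : Type} (f : σ → α → σ) (g : τ → α → τ)
    (l : List α) (s : σ) (t : τ) :
    l.foldl (fun (st : σ × τ) a => (f st.1 a, g st.2 a)) (s, t) = (l.foldl f s, l.foldl g t) := by
  induction l generalizing s t with
  | nil => rfl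
  | cons a l ih => simp [List.foldl_cons, ih]

-- items of a modify-append fold from empty = dedup'd keys, each with its filtered values
theorem items_group {ν R : Type} (rows : List R) (key : R → String) (val : R → ν) :
    (rows.foldl (fun (d : PySem.Dict String (List ν)) r =>
        d.modify (key r) [] (· ++ [val r])) PySem.Dict.empty).items
      = (PySem.List.dedup (rows.map key)).map
          (fun k => (k, (rows.filter (fun r => key r == k)).map val)) := by
  have hnd : (rows.foldl (fun (d : PySem.Dict String (List ν)) r =>
        d.modify (key r) [] (· ++ [val r])) PySem.Dict.empty).keys.Nodup :=
    PySem.Dict.nodup_keys_foldl_modify_key rows key [] (fun _ r => (· ++ [val r])) _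
      (by simp [PySem.Dict.keys_empty])
  rw [PySem.Dict.items_eq_map_keys _ hnd []]
  have hkeys : (rows.foldl (fun (d : PySem.Dict String (List ν)) r =>
        d.modify (key r) [] (· ++ [val r])) PySem.Dict.empty).keys
      = PySem.List.dedup (rows.map key) := by
    rw [PySem.Dict.keys_foldl_modify_key rows key [] (fun _ r => (· ++ [val r]))]
    simp [PySem.List.dedup_eq_ofList, PySem.Dict.keys_empty]
    rfl
  rw [hkeys]
  refine List.map_congr_left (fun k _ => ?_)
  have hfold : rows.foldl (fun (d : PySem.Dict String (List ν)) r =>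
        d.modify (key r) [] (· ++ [val r])) PySem.Dict.empty
      = (rows.map (fun r => (key r, val r))).foldl
          (fun d p => d.modify p.1 [] (· ++ [p.2])) PySem.Dict.empty := by
    rw [List.foldl_map]
  congr 1
  rw [hfold, PySem.Dict.getD_foldl_modify_append]
  simp [PySem.Dict.getD_empty, List.filter_map, Function.comp_def]

-- ===== VERDICT (by name: the statement is the Claim_ definition above) =====
theorem seperate_target_prediction_per_task_spec : Claim_equal_seperate_target_prediction_per_task := by
  intro predictions targets tasks _
  show _ = _
  unfold seperate_target_prediction_per_task seperate_target_prediction_per_task_alt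
  dsimp only
  rw [PySem.List.foldl_congr_mem (targets.zip (predictions.zip tasks)) _
      (fun (st : PySem.Dict String (List (List (List (String × String)))) ×
          PySem.Dict String (List (List (List (String × String))))) row =>
        (st.1.modify row.2.2 [] (· ++ [row.1]), st.2.modify row.2.2 [] (· ++ [row.2.1])))
      (PySem.Dict.empty, PySem.Dict.empty)
      (fun st row _ => by dsimp only; rw [ensure_modify, ensure_modify])]
  have hsplit : (targets.zip (predictions.zip tasks)).foldl
      (fun (st : PySem.Dict String (List (List (List (String × String)))) ×
          PySem.Dict String (List (List (List (String × String))))) row =>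
        (st.1.modify row.2.2 [] (· ++ [row.1]), st.2.modify row.2.2 [] (· ++ [row.2.1])))
      (PySem.Dict.empty, PySem.Dict.empty)
    = ((targets.zip (predictions.zip tasks)).foldl
        (fun (d : PySem.Dict String (List (List (List (String × String))))) row =>
          d.modify row.2.2 [] (· ++ [row.1])) PySem.Dict.empty,
       (targets.zip (predictions.zip tasks)).foldl
        (fun (d : PySem.Dict String (List (List (List (String × String))))) row =>
          d.modify row.2.2 [] (· ++ [row.2.1])) PySem.Dict.empty) :=
    foldl_pair_split
      (fun (d : PySem.Dict String (List (List (List (String × String)))))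
           (row : List (List (String × String)) × List (List (String × String)) × String) =>
        d.modify row.2.2 [] (· ++ [row.1]))
      (fun (d : PySem.Dict String (List (List (List (String × String)))))
           (row : List (List (String × String)) × List (List (String × String)) × String) =>
        d.modify row.2.2 [] (· ++ [row.2.1])) _ _ _
  rw [hsplit]
  exact Prod.ext
    (items_group (targets.zip (predictions.zip tasks)) (fun r => r.2.2) (fun r => r.1))
    (items_group (targets.zip (predictions.zip tasks)) (fun r => r.2.2) (fun r => r.2.1))
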